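-- pv_equiv track=rewrite | github.com/conanWinner/Schedule_Project | test.py | evaluate
-- ===== SOURCE A (Python) =====
-- def evaluate(individual):
--     # Mục tiêu 1: Đếm số xung đột phòng
--     conflicts = 0
--     room_time = {}
--     for class_idx, (room, time) in enumerate(individual):
--         key = (room, time)
--         if key in room_time:
--             conflicts += 1
--         else:
--             room_time[key] = True
--
--     # Mục tiêu 2: Đếm số khung giờ liên tiếp của giáo viên
--     teacher_load = 0
--     times = sorted([t for _, t in individual[:2]])  # Giả sử C1, C2 do G1 dạy
--     if len(times) > 1 and times[1] == times[0] + 1: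
--         teacher_load += 1
--
--     return conflicts, teacher_load
-- ===== SOURCE B (Python) =====
-- def evaluate(individual):
--     # An occurrence is a conflict iff the same (room, time) reappears LATER:
--     # scan head/tail, no dict needed.
--     conflicts = 0
--     rest = list(individual)
--     while rest:
--         p = rest.pop(0)
--         if p in rest:
--             conflicts += 1
--     teacher_load = 0
--     if len(individual) >= 2 and abs(individual[0][1] - individual[1][1]) == 1:
--         teacher_load = 1
--     return conflicts, teacher_load
-- ===== Notes on version B (the rewrite author's own statement) =====
-- stated objective: alternative
-- what changed: Conflicts are counted without any dict: a head/tail scan marks an occurrence as a conflict iff the same (room,time) pair reappears later in the remaining list (counting later-duplicates instead of earlier-duplicates), and the teacher flag is a direct |t0-t1|==1 adjacency check on the first two entries instead of sort-then-compare.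
import Mathlib
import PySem

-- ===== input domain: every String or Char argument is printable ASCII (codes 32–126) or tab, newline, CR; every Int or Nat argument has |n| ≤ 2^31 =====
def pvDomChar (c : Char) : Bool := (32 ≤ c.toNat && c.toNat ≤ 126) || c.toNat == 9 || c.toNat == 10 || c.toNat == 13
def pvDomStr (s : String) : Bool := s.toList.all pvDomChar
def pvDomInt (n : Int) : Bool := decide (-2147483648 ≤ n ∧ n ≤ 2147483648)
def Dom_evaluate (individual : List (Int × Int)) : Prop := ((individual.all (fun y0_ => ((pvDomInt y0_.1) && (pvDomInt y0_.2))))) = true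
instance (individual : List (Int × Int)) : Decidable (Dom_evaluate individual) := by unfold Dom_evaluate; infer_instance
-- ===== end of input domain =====

-- B counts conflicts with a dict-free head/tail scan (an occurrence conflicts iff its
-- (room,time) reappears later) and replaces A's sort of the first two times by a direct
-- |t0 - t1| == 1 adjacency check (alternative decomposition, not claimed faster).


-- ===== PORT A =====
def evaluate (individual : List (Int × Int)) : Int × Int :=
  -- for class_idx, (room, time) in enumerate(individual): key in room_time → conflicts += 1 else insert
  let st := individual.foldl
    (fun (st : Int × PySem.Dict (Int × Int) Bool) p =>
      if st.2.contains (p.1, p.2) then (st.1 + 1, st.2)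
      else (st.1, st.2.insert (p.1, p.2) true))
    (0, PySem.Dict.empty)
  let conflicts := st.1
  -- times = sorted([t for _, t in individual[:2]])
  let times : List Int := PySem.List.sorted ((PySem.List.slice individual none (some 2)).map (fun x => x.2)) (fun t => t) false
  let teacher_load : Int :=
    if 1 < times.length ∧ PySem.List.pyGetD times 1 0 = PySem.List.pyGetD times 0 0 + 1 then 1 else 0
  (conflicts, teacher_load)

-- ===== PORT B =====
-- the 'while rest: p = rest.pop(0); if p in rest: conflicts += 1' loop, as structural recursion
def conflictsB : List (Int × Int) → Int
  | [] => 0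
  | p :: rest => (if rest.contains p then 1 else 0) + conflictsB rest

def evaluate_alt (individual : List (Int × Int)) : Int × Int :=
  let conflicts := conflictsB individual
  -- if len(individual) >= 2 and abs(individual[0][1] - individual[1][1]) == 1
  let teacher_load : Int :=
    match individual with
    | p :: q :: _ => if (p.2 - q.2).natAbs = 1 then 1 else 0
    | _ => 0
  (conflicts, teacher_load)

-- ===== PRECONDITION & SPEC =====
def Spec_evaluate (individual : List (Int × Int)) (out : Int × Int) : Prop := out = evaluate_alt individual
instance (individual : List (Int × Int)) (out : Int × Int) : Decidable (Spec_evaluate individual out) := by unfold Spec_evaluate; infer_instance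

-- ===== CLAIM (what is proved, stated in full; the proofs are below) =====
def Claim_equal_evaluate : Prop := ∀ (individual : List (Int × Int)), Dom_evaluate individual → Spec_evaluate individual (evaluate individual)

-- ===== LEMMAS AND PROOFS =====

-- A's conflict loop counts, in closed form, length minus number of distinct keys added so far.
theorem evaluate_loop_eq (l : List (Int × Int)) :
    ∀ (c : Int) (d : PySem.Dict (Int × Int) Bool),
      (l.foldl
        (fun (st : Int × PySem.Dict (Int × Int) Bool) p =>
          if st.2.contains (p.1, p.2) then (st.1 + 1, st.2)
          else (st.1, st.2.insert (p.1, p.2) true))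
        (c, d)).1
      = c + (l.length : Int) - (((PySem.Set.update d.keys l).length : Int) - (d.keys.length : Int)) := by
  induction l with
  | nil => intro c d; simp [PySem.Set.update]
  | cons p l ih =>
    intro c d
    by_cases h : d.contains (p.1, p.2) = true
    · have hmem : p ∈ d.keys := by
        have := (PySem.Dict.contains_iff_mem_keys (d := d) (k := (p.1, p.2))).mp h
        simpa using this
      have hadd : PySem.Set.add d.keys p = d.keys := by
        simp [PySem.Set.add, PySem.Set.contains, hmem]
      have hupd : PySem.Set.update d.keys (p :: l) = PySem.Set.update d.keys l := by
        simp [PySem.Set.update, hadd]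
      simp only [List.foldl_cons, h, if_pos]
      rw [ih (c + 1) d, hupd]
      simp only [List.length_cons]
      push_cast
      ring
    · have h' : d.contains (p.1, p.2) = false := by simpa using h
      have hmem : p ∉ d.keys := by
        intro hm
        have : d.contains (p.1, p.2) = true :=
          (PySem.Dict.contains_iff_mem_keys (d := d) (k := (p.1, p.2))).mpr (by simpa using hm)
        simp [this] at h'
      have hadd : PySem.Set.add d.keys p = d.keys ++ [p] := by
        simp [PySem.Set.add, PySem.Set.contains, hmem]
      have hkeys : (d.insert (p.1, p.2) true).keys = d.keys ++ [(p.1, p.2)] :=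
        PySem.Dict.keys_insert_of_not_contains d true h'
      have hupd : PySem.Set.update d.keys (p :: l) = PySem.Set.update (d.keys ++ [p]) l := by
        simp [PySem.Set.update, hadd]
      simp only [List.foldl_cons, h', Bool.false_eq_true, if_neg, not_false_iff]
      rw [ih c (d.insert (p.1, p.2) true), hkeys, hupd]
      simp only [List.length_cons, List.length_append, List.length_cons, List.length_nil]
      push_cast
      ring

-- distinct count of a list, via the deduplicated Set
theorem ofList_length_eq_card (l : List (Int × Int)) :
    (PySem.Set.ofList l).length = l.toFinset.card := by
  have hnd : (PySem.Set.ofList l).Nodup := PySem.Set.nodup_ofList l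
  have hfin : (PySem.Set.ofList l).toFinset = l.toFinset := by
    ext x
    simp [List.mem_toFinset, PySem.Set.mem_ofList]
  rw [← hfin, List.toFinset_card_of_nodup hnd]

-- B's later-duplicate count equals length minus distinct count.
theorem conflictsB_eq (l : List (Int × Int)) :
    conflictsB l = (l.length : Int) - (l.toFinset.card : Int) := by
  induction l with
  | nil => simp [conflictsB]
  | cons p t ih =>
    by_cases h : p ∈ t
    · have hc : t.contains p = true := by simpa using h
      have hcard : (p :: t).toFinset.card = t.toFinset.card := by
        simp [List.toFinset_cons, Finset.insert_eq_self.mpr (List.mem_toFinset.mpr h)]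
      simp only [conflictsB, hc, if_pos, hcard, List.length_cons, ih]
      push_cast; ring
    · have hc : t.contains p = false := by simpa using h
      have hcard : (p :: t).toFinset.card = t.toFinset.card + 1 := by
        simp [List.toFinset_cons, Finset.card_insert_of_notMem (fun hm => h (List.mem_toFinset.mp hm))]
      simp only [conflictsB, hc, Bool.false_eq_true, if_neg, not_false_iff, hcard,
        List.length_cons, ih]
      push_cast; ring

theorem evaluate_conflicts_eq (l : List (Int × Int)) :
    (l.foldl
      (fun (st : Int × PySem.Dict (Int × Int) Bool) p =>
        if st.2.contains (p.1, p.2) then (st.1 + 1, st.2)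
        else (st.1, st.2.insert (p.1, p.2) true))
      (0, PySem.Dict.empty)).1
    = conflictsB l := by
  rw [evaluate_loop_eq, conflictsB_eq]
  simp [PySem.Dict.keys_empty, PySem.Set.update_nil_left, ofList_length_eq_card]

theorem sorted_single (x : Int) : PySem.List.sorted [x] (fun t => t) false = [x] := by
  simp [PySem.List.sorted, PySem.List.insertBy]

theorem sorted_pair_le {a b : Int} (h : a ≤ b) : PySem.List.sorted [a, b] (fun t => t) false = [a, b] :=
  PySem.List.sorted_eq_self_of_pairwise (xs := [a, b]) (fun t => t) (by simp [h])

theorem sorted_pair_gt {a b : Int} (h : b < a) : PySem.List.sorted [a, b] (fun t => t) false = [b, a] :=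
  PySem.List.sorted_eq_of_perm_of_pairwise_lt (xs := [a, b]) (ys := [b, a]) (fun t => t)
    (List.Perm.swap a b []) (by simp [h])

theorem evaluate_teacher_eq (l : List (Int × Int)) :
    (if 1 < (PySem.List.sorted ((PySem.List.slice l none (some 2)).map (fun x => x.2)) (fun t => t) false).length ∧
          PySem.List.pyGetD (PySem.List.sorted ((PySem.List.slice l none (some 2)).map (fun x => x.2)) (fun t => t) false) 1 0
            = PySem.List.pyGetD (PySem.List.sorted ((PySem.List.slice l none (some 2)).map (fun x => x.2)) (fun t => t) false) 0 0 + 1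
        then (1 : Int) else 0)
    = (match l with
      | p :: q :: _ => if (p.2 - q.2).natAbs = 1 then (1 : Int) else 0
      | _ => 0) := by
  have hs : PySem.List.slice l none (some (2 : Int)) = l.take 2 := by
    have := PySem.List.slice_to (xs := l) (b := (2 : Int)) (by norm_num)
    simpa using this
  rw [hs]
  match l with
  | [] => simp
  | [p] => simp [sorted_single, PySem.List.pyGetD]
  | p :: q :: rest =>
    simp only [List.take, List.map]
    by_cases h : p.2 ≤ q.2
    · simp only [sorted_pair_le h]
      simp only [PySem.List.pyGetD, PySem.List.pyGet?, PySem.List.pyIdx?]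
      norm_num
      split_ifs with h1 h2 <;> omega
    · simp only [sorted_pair_gt (by omega : q.2 < p.2)]
      simp only [PySem.List.pyGetD, PySem.List.pyGet?, PySem.List.pyIdx?]
      norm_num
      split_ifs with h1 h2 <;> omega

-- ===== VERDICT (by name: the statement is the Claim_ definition above) =====
theorem evaluate_spec : Claim_equal_evaluate := by
  intro individual _
  unfold Spec_evaluate evaluate evaluate_alt
  simp only []
  exact Prod.ext (evaluate_conflicts_eq individual) (evaluate_teacher_eq individual)
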